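-- pv_equiv track=rewrite | github.com/harishbabu2007/TechFest-Competition-Portal | Tech fest Questions/Longest Chain/solution.py | LongestChain
-- ===== SOURCE A (Python) =====
-- def LongestChain(numbers):
--   chain_len = 0
--
--   for i in range(0,len(numbers)-1):
--     band_curr = 1
--     for j in range(i,len(numbers)-1):
--       if numbers[j]+1 == numbers[j+1]:
--         band_curr += 1
--       else:
--         break
--
--     chain_len = max(chain_len, band_curr)
--
--   return chain_len
-- ===== SOURCE B (Python) =====
-- def LongestChain(numbers):
--   if len(numbers) < 2:
--     return 0
--   best = cur = 1
--   for x, y in zip(numbers, numbers[1:]):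
--     cur = cur + 1 if x + 1 == y else 1
--     if cur > best:
--       best = cur
--   return best
-- ===== Notes on version B (the rewrite author's own statement) =====
-- stated objective: faster
-- what changed: A restarts a fresh inner scan of the chain at every index (quadratic); B makes one pass over adjacent pairs tracking the current consecutive-run length and the best seen.
import Mathlib
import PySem

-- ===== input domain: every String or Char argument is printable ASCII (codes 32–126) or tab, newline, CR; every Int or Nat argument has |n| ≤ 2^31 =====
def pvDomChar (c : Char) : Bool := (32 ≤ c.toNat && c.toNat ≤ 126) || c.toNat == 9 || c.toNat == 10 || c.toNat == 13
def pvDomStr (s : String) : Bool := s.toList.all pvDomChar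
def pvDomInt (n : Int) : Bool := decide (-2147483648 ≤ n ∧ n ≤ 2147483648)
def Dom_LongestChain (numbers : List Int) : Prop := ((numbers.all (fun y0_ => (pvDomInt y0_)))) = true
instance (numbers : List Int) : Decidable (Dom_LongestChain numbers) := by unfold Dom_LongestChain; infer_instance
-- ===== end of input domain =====

-- B replaces A's quadratic restart-at-every-index scan by a single pass that tracks the current
-- consecutive-run length (objective: faster, asymptotic).

-- ===== PORT A =====
-- inner 'for j in range(i, len-1): … else break' loop of A (break ⇒ structural recursion on the range)
def bandLoopA (numbers : List Int) : List Int → Int → Int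
  | [], band_curr => band_curr
  | j :: js, band_curr =>
    if PySem.List.pyGetD numbers j 0 + 1 = PySem.List.pyGetD numbers (j + 1) 0 then
      bandLoopA numbers js (band_curr + 1)
    else band_curr  -- break

def LongestChain (numbers : List Int) : Int :=
  (PySem.List.pyRange 0 ((numbers.length : Int) - 1) 1).foldl
    (fun chain_len i =>
      max chain_len
        (bandLoopA numbers (PySem.List.pyRange i ((numbers.length : Int) - 1) 1) 1))
    0

-- ===== PORT B =====
def LongestChain_alt (numbers : List Int) : Int :=
  if numbers.length < 2 then 0
  else
    ((numbers.zip numbers.tail).foldl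
      (fun s p =>
        let cur := if p.1 + 1 = p.2 then s.2 + 1 else 1
        (if cur > s.1 then cur else s.1, cur))
      (1, 1)).1

-- ===== PRECONDITION & SPEC =====
def Spec_LongestChain (numbers : List Int) (out : Int) : Prop := out = LongestChain_alt numbers
instance (numbers : List Int) (out : Int) : Decidable (Spec_LongestChain numbers out) := by unfold Spec_LongestChain; infer_instance

-- ===== CLAIM (what is proved, stated in full; the proofs are below) =====
def Claim_equal_LongestChain : Prop := ∀ (numbers : List Int), Dom_LongestChain numbers → Spec_LongestChain numbers (LongestChain numbers)

-- ===== LEMMAS AND PROOFS =====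

/-- booleans of the adjacent "+1 step" tests of a list -/
def chainBools : List Int → List Bool
  | x :: y :: r => decide (x + 1 = y) :: chainBools (y :: r)
  | _ => []

/-- length of the leading run of `true`s -/
def leadT : List Bool → Int
  | true :: bs => 1 + leadT bs
  | _ => 0

/-- what remains after the leading run of `true`s and the `false` that ends it -/
def restOf : List Bool → List Bool
  | true :: bs => restOf bs
  | false :: bs => bs
  | [] => []

/-- max over all suffixes of (1 + leading-true-run), and 0 -/
def Hm : List Bool → Int
  | [] => 0
  | b :: bs => max (1 + leadT (b :: bs)) (Hm bs)

/-- the loop body of B, named (definitionally equal to the lambda in the port) -/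
def stepP (s : Int × Int) (p : Int × Int) : Int × Int :=
  let cur := if p.1 + 1 = p.2 then s.2 + 1 else 1
  (if cur > s.1 then cur else s.1, cur)

/-- B's loop body seen on the boolean of the pair -/
def stepB (s : Int × Int) (t : Bool) : Int × Int :=
  let cur := if t then s.2 + 1 else 1
  (if cur > s.1 then cur else s.1, cur)

theorem leadT_nonneg (bs : List Bool) : 0 ≤ leadT bs := by
  induction bs with
  | nil => simp [leadT]
  | cons b bs ih => cases b <;> simp [leadT] <;> omega

theorem Hm_nonneg (bs : List Bool) : 0 ≤ Hm bs := by
  induction bs with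
  | nil => simp [Hm]
  | cons b bs ih => simp [Hm]; omega

theorem Hm_decomp (b : Bool) (bs : List Bool) :
    Hm (b :: bs) = max (1 + leadT (b :: bs)) (Hm (restOf (b :: bs))) := by
  induction bs generalizing b with
  | nil => cases b <;> simp [Hm, leadT, restOf]
  | cons b' bs ih =>
    cases b with
    | false => simp [Hm, leadT, restOf]
    | true =>
      have h := ih b'
      have h1 := leadT_nonneg (b' :: bs)
      show max (1 + leadT (true :: b' :: bs)) (Hm (b' :: bs)) = _
      rw [h]
      simp only [leadT, restOf]
      omega

theorem chainBools_length (l : List Int) : (chainBools l).length = l.length - 1 := by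
  induction l with
  | nil => simp [chainBools]
  | cons x l ih =>
    cases l with
    | nil => simp [chainBools]
    | cons y r => simp [chainBools] at *; omega

theorem chainBools_getElem (l : List Int) (j : Nat) (h : j + 1 < l.length) :
    (chainBools l)[j]'(by rw [chainBools_length]; omega) =
      decide (l[j] + 1 = l[j + 1]) := by
  induction l generalizing j with
  | nil => simp at h
  | cons x l ih =>
    cases l with
    | nil => simp at h
    | cons y r =>
      cases j with
      | zero => simp [chainBools]
      | succ j' =>
        simp only [chainBools]
        have h' : j' + 1 < (y :: r).length := by simpa using h
        simpa using ih j' h'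

theorem bandLoopA_eq (numbers : List Int) (k : Nat) :
    ∀ (jn : Nat) (acc : Int), numbers.length - 1 - jn ≤ k →
      bandLoopA numbers (PySem.List.pyRange (jn : Int) ((numbers.length : Int) - 1) 1) acc
        = acc + leadT ((chainBools numbers).drop jn) := by
  induction k with
  | zero =>
    intro jn acc hk
    have hnil : PySem.List.pyRange (jn : Int) ((numbers.length : Int) - 1) 1 = [] :=
      PySem.List.pyRange_one_eq_nil (by omega)
    have hdrop : (chainBools numbers).drop jn = [] := by
      apply List.drop_eq_nil_of_le
      rw [chainBools_length]; omega
    rw [hnil, hdrop]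
    simp [bandLoopA, leadT]
  | succ k ih =>
    intro jn acc hk
    by_cases hlt : jn + 1 < numbers.length
    · have hcons : PySem.List.pyRange (jn : Int) ((numbers.length : Int) - 1) 1
          = (jn : Int) :: PySem.List.pyRange ((jn : Int) + 1) ((numbers.length : Int) - 1) 1 :=
        PySem.List.pyRange_one_cons (by omega)
      have hjb : jn < (chainBools numbers).length := by rw [chainBools_length]; omega
      have hdrop : (chainBools numbers).drop jn
          = (chainBools numbers)[jn] :: (chainBools numbers).drop (jn + 1) :=
        List.drop_eq_getElem_cons hjb
      have hget : (chainBools numbers)[jn] = decide (numbers[jn] + 1 = numbers[jn + 1]) :=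
        chainBools_getElem numbers jn hlt
      have hg1 : PySem.List.pyGetD numbers (jn : Int) 0 = numbers[jn]'(by omega) := by
        rw [PySem.List.pyGetD_natCast]
        exact List.getD_eq_getElem numbers 0 (by omega)
      have hg2 : PySem.List.pyGetD numbers ((jn : Int) + 1) 0 = numbers[jn + 1]'(by omega) := by
        have hcc : ((jn : Int) + 1) = ((jn + 1 : Nat) : Int) := by push_cast; ring
        rw [hcc, PySem.List.pyGetD_natCast]
        exact List.getD_eq_getElem numbers 0 (by omega)
      rw [hcons, hdrop, hget]
      by_cases hc : numbers[jn]'(by omega) + 1 = numbers[jn + 1]'(by omega)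
      · have hrec := ih (jn + 1) (acc + 1) (by omega)
        have hcast : ((jn + 1 : Nat) : Int) = (jn : Int) + 1 := by push_cast; ring
        rw [hcast] at hrec
        simp only [bandLoopA, hg1, hg2, hrec, hc, decide_true, leadT]
        simp; ring
      · simp only [bandLoopA, hg1, hg2, hc, decide_false, leadT]
        simp
    · have hnil : PySem.List.pyRange (jn : Int) ((numbers.length : Int) - 1) 1 = [] :=
        PySem.List.pyRange_one_eq_nil (by omega)
      have hdrop : (chainBools numbers).drop jn = [] := by
        apply List.drop_eq_nil_of_le
        rw [chainBools_length]; omega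
      rw [hnil, hdrop]
      simp [bandLoopA, leadT]

theorem loopA_eq (numbers : List Int) (l : List Bool) :
    ∀ (jn : Nat) (acc : Int), 0 ≤ acc → l = (chainBools numbers).drop jn →
      ((PySem.List.pyRange (jn : Int) ((numbers.length : Int) - 1) 1).foldl
        (fun chain_len i =>
          max chain_len
            (bandLoopA numbers (PySem.List.pyRange i ((numbers.length : Int) - 1) 1) 1))
        acc) = max acc (Hm l) := by
  induction l with
  | nil =>
    intro jn acc hacc hl
    have hge : (chainBools numbers).length ≤ jn := by
      by_contra h
      exact absurd hl.symm (by simp [List.drop_eq_nil_iff]; omega)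
    have hnil : PySem.List.pyRange (jn : Int) ((numbers.length : Int) - 1) 1 = [] := by
      apply PySem.List.pyRange_one_eq_nil
      rw [chainBools_length] at hge; omega
    rw [hnil]
    simp [Hm]; omega
  | cons b l' ih =>
    intro jn acc hacc hl
    have hlt : jn < (chainBools numbers).length := by
      by_contra h
      rw [List.drop_eq_nil_of_le (by omega)] at hl
      exact absurd hl (by simp)
    rw [chainBools_length] at hlt
    have hcons : PySem.List.pyRange (jn : Int) ((numbers.length : Int) - 1) 1
        = (jn : Int) :: PySem.List.pyRange ((jn : Int) + 1) ((numbers.length : Int) - 1) 1 :=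
      PySem.List.pyRange_one_cons (by omega)
    have hband : bandLoopA numbers (PySem.List.pyRange (jn : Int) ((numbers.length : Int) - 1) 1) 1
        = 1 + leadT (b :: l') := by
      rw [bandLoopA_eq numbers (numbers.length) jn 1 (by omega), ← hl]
    have hl' : l' = (chainBools numbers).drop (jn + 1) := by
      rw [← List.tail_drop, ← hl]
      rfl
    have hcast : ((jn + 1 : Nat) : Int) = (jn : Int) + 1 := by push_cast; ring
    have hrec := ih (jn + 1) (max acc (1 + leadT (b :: l'))) (by have := leadT_nonneg (b :: l'); omega) hl'
    rw [hcast] at hrec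
    rw [hcons, List.foldl_cons, hband, hrec]
    simp only [Hm]
    omega

/-- B's fold over adjacent pairs equals the same fold over `chainBools`. -/
theorem zip_fold_eq (l : List Int) (s : Int × Int) :
    (l.zip l.tail).foldl stepP s = (chainBools l).foldl stepB s := by
  induction l generalizing s with
  | nil => simp [chainBools]
  | cons x l ih =>
    cases l with
    | nil => simp [chainBools]
    | cons y r =>
      simp only [List.tail_cons, List.zip_cons_cons, List.foldl_cons, chainBools]
      simp only [List.tail_cons] at ih
      rw [ih]
      congr 1
      simp only [stepP, stepB]
      by_cases h : x + 1 = y <;> simp [h]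

theorem stepB_true (b c : Int) :
    stepB (b, c) true = (max b (c + 1), c + 1) := by
  simp only [stepB]
  split_ifs with h1 <;> simp_all <;> omega

theorem stepB_false (b c : Int) (h1 : 1 ≤ c) (h2 : c ≤ b) :
    stepB (b, c) false = (b, 1) := by
  simp only [stepB]
  split_ifs with h3 <;> simp_all <;> omega

theorem foldB_eq (bs : List Bool) :
    ∀ (b c : Int), 1 ≤ c → c ≤ b →
      ((bs.foldl stepB (b, c)).1) = max b (max (c + leadT bs) (Hm (restOf bs))) := by
  induction bs with
  | nil =>
    intro b c h1 h2
    simp [leadT, restOf, Hm]; omega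
  | cons t bs ih =>
    intro b c h1 h2
    cases t with
    | true =>
      rw [List.foldl_cons, stepB_true b c, ih (max b (c + 1)) (c + 1) (by omega) (by omega)]
      have := leadT_nonneg bs
      simp only [leadT, restOf]
      omega
    | false =>
      rw [List.foldl_cons, stepB_false b c h1 h2, ih b 1 le_rfl (by omega)]
      simp only [leadT, restOf]
      cases bs with
      | nil => simp [Hm, restOf, leadT]; omega
      | cons b' bs' =>
        rw [Hm_decomp b' bs']
        omega

theorem altB_eq_Hm (numbers : List Int) (h : 2 ≤ numbers.length) :
    LongestChain_alt numbers = Hm (chainBools numbers) := by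
  have hB : LongestChain_alt numbers = ((numbers.zip numbers.tail).foldl stepP (1, 1)).1 := by
    unfold LongestChain_alt
    rw [if_neg (by omega)]
    rfl
  rw [hB, zip_fold_eq, foldB_eq (chainBools numbers) 1 1 le_rfl le_rfl]
  have hb : chainBools numbers ≠ [] := by
    intro hn
    have hl := chainBools_length numbers
    rw [hn] at hl; simp at hl; omega
  obtain ⟨b, bs, hbs⟩ := List.exists_cons_of_ne_nil hb
  rw [hbs, Hm_decomp b bs]
  have h1 := leadT_nonneg (b :: bs)
  have h2 := Hm_nonneg (restOf (b :: bs))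
  omega

-- ===== VERDICT (by name: the statement is the Claim_ definition above) =====
theorem LongestChain_spec : Claim_equal_LongestChain := by
  intro numbers _
  unfold Spec_LongestChain LongestChain
  by_cases h : numbers.length < 2
  · have hnil : PySem.List.pyRange 0 ((numbers.length : Int) - 1) 1 = [] :=
      PySem.List.pyRange_one_eq_nil (by omega)
    rw [hnil]
    unfold LongestChain_alt
    rw [if_pos h]
    simp
  · have h2 : 2 ≤ numbers.length := by omega
    have hA := loopA_eq numbers (chainBools numbers) 0 0 le_rfl (by simp)
    simp only [Nat.cast_zero] at hA
    rw [hA, altB_eq_Hm numbers h2]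
    have := Hm_nonneg (chainBools numbers)
    omega
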